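-- pv_equiv track=rewrite | github.com/wuzengding/Sakit2Neo | workflow/scripts/generate_somatic_report.py | get_amino_acid_sub_status
-- ===== SOURCE A (Python) =====
-- PROTEIN_ALTERING_CONSEQUENCES = {
--     'transcript_ablation',
--     'splice_acceptor_variant',
--     'splice_donor_variant',
--     'stop_gained',
--     'frameshift_variant',
--     'stop_lost',
--     'start_lost',
--     'inframe_insertion',
--     'inframe_deletion',
--     'missense_variant',
--     'protein_altering_variant',
-- }
--
-- def get_amino_acid_sub_status(consequences):
--     """
--     根据VEP的consequence列表，判断氨基酸的变化子类型。
--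
--     Args:
--         consequences (list): 从VEP CSQ字段解析出的consequence字符串列表。
--
--     Returns:
--         str: 'No_AA_Altered', 'Stop_Gained', 'Long_AA_Altered', or 'Single_AA_Altered'.
--     """
--     is_protein_altering = any(c in PROTEIN_ALTERING_CONSEQUENCES for c in consequences)
--
--     if not is_protein_altering:
--         return "No_AA_Altered"
--
--     # 如果是蛋白质改变类型，再进行细分
--     if 'stop_gained' in consequences:
--         return "Stop_Gained"
--     elif any(c in ['frameshift_variant', 'splice_acceptor_variant', 'splice_donor_variant', 'stop_lost'] for c in consequences):
--         return "Long_AA_Altered"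
--     else:
--         # 包括 missense_variant, inframe_insertion, inframe_deletion 等
--         return "Single_AA_Altered"
-- ===== SOURCE B (Python) =====
-- _PRIORITY = {
--     'stop_gained': 0,
--     'frameshift_variant': 1,
--     'splice_acceptor_variant': 1,
--     'splice_donor_variant': 1,
--     'stop_lost': 1,
--     'transcript_ablation': 2,
--     'start_lost': 2,
--     'inframe_insertion': 2,
--     'inframe_deletion': 2,
--     'missense_variant': 2,
--     'protein_altering_variant': 2,
-- }
--
-- _LABELS = ("Stop_Gained", "Long_AA_Altered", "Single_AA_Altered", "No_AA_Altered")
--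
-- def get_amino_acid_sub_status(consequences):
--     best = 3
--     for c in consequences:
--         best = min(best, _PRIORITY.get(c, 3))
--     return _LABELS[best]
-- ===== Notes on version B (the rewrite author's own statement) =====
-- stated objective: simpler
-- what changed: Replaced the four separate membership scans (any over the protein-altering set, 'stop_gained' lookup, any over the long list) with one table-driven pass keeping the minimum priority from a single consequence-to-priority dict, then indexing a label tuple.
import Mathlib
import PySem

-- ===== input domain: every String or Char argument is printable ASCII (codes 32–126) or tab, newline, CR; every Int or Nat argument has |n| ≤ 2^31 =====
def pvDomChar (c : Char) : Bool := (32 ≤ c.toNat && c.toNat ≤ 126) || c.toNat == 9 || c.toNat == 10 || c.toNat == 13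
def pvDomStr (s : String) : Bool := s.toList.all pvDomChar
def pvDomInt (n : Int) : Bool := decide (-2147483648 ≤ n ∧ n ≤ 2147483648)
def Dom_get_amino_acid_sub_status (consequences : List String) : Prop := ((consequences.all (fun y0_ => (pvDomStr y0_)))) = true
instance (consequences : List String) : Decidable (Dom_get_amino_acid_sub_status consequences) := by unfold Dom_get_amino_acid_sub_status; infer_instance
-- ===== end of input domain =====

-- B replaces A's four separate membership scans by one table-driven pass that keeps
-- the minimum priority from a consequence→priority dict; objective: simpler.

-- ===== PORT A =====
-- Python: PROTEIN_ALTERING_CONSEQUENCES (a set literal used only for membership tests)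
def PROTEIN_ALTERING_CONSEQUENCES : List String :=
  ["transcript_ablation", "splice_acceptor_variant", "splice_donor_variant",
   "stop_gained", "frameshift_variant", "stop_lost", "start_lost",
   "inframe_insertion", "inframe_deletion", "missense_variant",
   "protein_altering_variant"]

def get_amino_acid_sub_status (consequences : List String) : String :=
  let is_protein_altering :=
    consequences.any (fun c => PROTEIN_ALTERING_CONSEQUENCES.contains c)
  if !is_protein_altering then "No_AA_Altered"
  else if consequences.contains "stop_gained" then "Stop_Gained"
  else if consequences.any (fun c =>
      (["frameshift_variant", "splice_acceptor_variant",
        "splice_donor_variant", "stop_lost"] : List String).contains c) then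
    "Long_AA_Altered"
  else "Single_AA_Altered"

-- ===== PORT B =====
def pv_PRIORITY : PySem.Dict String Int :=
  ⟨[("stop_gained", 0), ("frameshift_variant", 1), ("splice_acceptor_variant", 1),
    ("splice_donor_variant", 1), ("stop_lost", 1), ("transcript_ablation", 2),
    ("start_lost", 2), ("inframe_insertion", 2), ("inframe_deletion", 2),
    ("missense_variant", 2), ("protein_altering_variant", 2)]⟩

def pv_LABELS : List String :=
  ["Stop_Gained", "Long_AA_Altered", "Single_AA_Altered", "No_AA_Altered"]

def get_amino_acid_sub_status_alt (consequences : List String) : String :=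
  let best := consequences.foldl
    (fun best c => min best (PySem.Dict.getD pv_PRIORITY c 3)) 3
  (PySem.List.pyGet? pv_LABELS best).getD ""   -- 0 ≤ best ≤ 3 always, so never none

-- ===== PRECONDITION & SPEC =====
def Spec_get_amino_acid_sub_status (consequences : List String) (out : String) : Prop := out = get_amino_acid_sub_status_alt consequences
instance (consequences : List String) (out : String) : Decidable (Spec_get_amino_acid_sub_status consequences out) := by unfold Spec_get_amino_acid_sub_status; infer_instance

-- ===== CLAIM (what is proved, stated in full; the proofs are below) =====
def Claim_equal_get_amino_acid_sub_status : Prop := ∀ (consequences : List String), Dom_get_amino_acid_sub_status consequences → Spec_get_amino_acid_sub_status consequences (get_amino_acid_sub_status consequences)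

-- ===== LEMMAS AND PROOFS =====

-- the classification value of a whole list, phrased with A's three scans
def pvG (cs : List String) : Int :=
  if cs.contains "stop_gained" then 0
  else if cs.any (fun c =>
      (["frameshift_variant", "splice_acceptor_variant",
        "splice_donor_variant", "stop_lost"] : List String).contains c) then 1
  else if cs.any (fun c => PROTEIN_ALTERING_CONSEQUENCES.contains c) then 2
  else 3

lemma pvG_bounds (cs : List String) : 0 ≤ pvG cs ∧ pvG cs ≤ 3 := by
  unfold pvG; split_ifs <;> omega

lemma pvG_cons (c : String) (cs : List String) :
    pvG (c :: cs) = min (PySem.Dict.getD pv_PRIORITY c 3) (pvG cs) := by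
  have hb := pvG_bounds cs
  by_cases h0 : c = "stop_gained"
  · subst h0
    have hget : PySem.Dict.getD pv_PRIORITY "stop_gained" 3 = 0 := by decide
    rw [hget]
    simp only [pvG]
    simp [List.contains_cons, List.any_cons, PROTEIN_ALTERING_CONSEQUENCES]
    try split_ifs <;> omega
  by_cases h1 : c = "frameshift_variant"
  · subst h1
    have hget : PySem.Dict.getD pv_PRIORITY "frameshift_variant" 3 = 1 := by decide
    rw [hget]
    simp only [pvG]
    simp [List.contains_cons, List.any_cons, PROTEIN_ALTERING_CONSEQUENCES]
    try split_ifs <;> omega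
  by_cases h2 : c = "splice_acceptor_variant"
  · subst h2
    have hget : PySem.Dict.getD pv_PRIORITY "splice_acceptor_variant" 3 = 1 := by decide
    rw [hget]
    simp only [pvG]
    simp [List.contains_cons, List.any_cons, PROTEIN_ALTERING_CONSEQUENCES]
    try split_ifs <;> omega
  by_cases h3 : c = "splice_donor_variant"
  · subst h3
    have hget : PySem.Dict.getD pv_PRIORITY "splice_donor_variant" 3 = 1 := by decide
    rw [hget]
    simp only [pvG]
    simp [List.contains_cons, List.any_cons, PROTEIN_ALTERING_CONSEQUENCES]
    try split_ifs <;> omega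
  by_cases h4 : c = "stop_lost"
  · subst h4
    have hget : PySem.Dict.getD pv_PRIORITY "stop_lost" 3 = 1 := by decide
    rw [hget]
    simp only [pvG]
    simp [List.contains_cons, List.any_cons, PROTEIN_ALTERING_CONSEQUENCES]
    try split_ifs <;> omega
  by_cases h5 : c = "transcript_ablation"
  · subst h5
    have hget : PySem.Dict.getD pv_PRIORITY "transcript_ablation" 3 = 2 := by decide
    rw [hget]
    simp only [pvG]
    simp [List.contains_cons, List.any_cons, PROTEIN_ALTERING_CONSEQUENCES]
    try split_ifs <;> omega
  by_cases h6 : c = "start_lost"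
  · subst h6
    have hget : PySem.Dict.getD pv_PRIORITY "start_lost" 3 = 2 := by decide
    rw [hget]
    simp only [pvG]
    simp [List.contains_cons, List.any_cons, PROTEIN_ALTERING_CONSEQUENCES]
    try split_ifs <;> omega
  by_cases h7 : c = "inframe_insertion"
  · subst h7
    have hget : PySem.Dict.getD pv_PRIORITY "inframe_insertion" 3 = 2 := by decide
    rw [hget]
    simp only [pvG]
    simp [List.contains_cons, List.any_cons, PROTEIN_ALTERING_CONSEQUENCES]
    try split_ifs <;> omega
  by_cases h8 : c = "inframe_deletion"
  · subst h8
    have hget : PySem.Dict.getD pv_PRIORITY "inframe_deletion" 3 = 2 := by decide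
    rw [hget]
    simp only [pvG]
    simp [List.contains_cons, List.any_cons, PROTEIN_ALTERING_CONSEQUENCES]
    try split_ifs <;> omega
  by_cases h9 : c = "missense_variant"
  · subst h9
    have hget : PySem.Dict.getD pv_PRIORITY "missense_variant" 3 = 2 := by decide
    rw [hget]
    simp only [pvG]
    simp [List.contains_cons, List.any_cons, PROTEIN_ALTERING_CONSEQUENCES]
    try split_ifs <;> omega
  by_cases h10 : c = "protein_altering_variant"
  · subst h10
    have hget : PySem.Dict.getD pv_PRIORITY "protein_altering_variant" 3 = 2 := by decide
    rw [hget]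
    simp only [pvG]
    simp [List.contains_cons, List.any_cons, PROTEIN_ALTERING_CONSEQUENCES]
    try split_ifs <;> omega
  -- c is none of the 11 keys: priority 3, classification unchanged
  · have hcp : c ∉ PROTEIN_ALTERING_CONSEQUENCES := by
      simp [PROTEIN_ALTERING_CONSEQUENCES, h0, h1, h2, h3, h4, h5, h6, h7, h8, h9, h10]
    have hget : PySem.Dict.getD pv_PRIORITY c 3 = 3 := by
      simp [pv_PRIORITY, PySem.Dict.getD, PySem.Dict.get?_mk_cons, PySem.Dict.get?,
        List.find?_nil, beq_iff_eq, Ne.symm h0, Ne.symm h1, Ne.symm h2, Ne.symm h3,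
        Ne.symm h4, Ne.symm h5, Ne.symm h6, Ne.symm h7, Ne.symm h8, Ne.symm h9, Ne.symm h10]
    have hG : pvG (c :: cs) = pvG cs := by
      simp [pvG, List.contains_cons, List.any_cons, hcp, Ne.symm h0,
        h1, h2, h3, h4]
    rw [hget, hG]
    omega

lemma pvFold_eq (cs : List String) (b : Int) (hb3 : b ≤ 3) :
    cs.foldl (fun best c => min best (PySem.Dict.getD pv_PRIORITY c 3)) b
      = min b (pvG cs) := by
  induction cs generalizing b with
  | nil => simp [pvG]; omega
  | cons c cs ih =>
      rw [List.foldl_cons,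
        ih (min b (PySem.Dict.getD pv_PRIORITY c 3))
          (le_trans (min_le_left _ _) hb3),
        pvG_cons]
      omega

lemma pvStop_imp (cs : List String) (h : cs.contains "stop_gained" = true) :
    cs.any (fun c => PROTEIN_ALTERING_CONSEQUENCES.contains c) = true := by
  rw [List.any_eq_true]
  exact ⟨"stop_gained", by simpa using h, by decide⟩

lemma pvLong_imp (cs : List String)
    (h : cs.any (fun c =>
      (["frameshift_variant", "splice_acceptor_variant",
        "splice_donor_variant", "stop_lost"] : List String).contains c) = true) :
    cs.any (fun c => PROTEIN_ALTERING_CONSEQUENCES.contains c) = true := by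
  rw [List.any_eq_true] at h ⊢
  obtain ⟨x, hx, hx2⟩ := h
  refine ⟨x, hx, ?_⟩
  simp only [List.contains_eq_mem, decide_eq_true_eq, List.mem_cons,
    List.not_mem_nil, or_false] at hx2 ⊢
  rcases hx2 with h | h | h | h <;> subst h <;> decide

-- ===== VERDICT (by name: the statement is the Claim_ definition above) =====
theorem get_amino_acid_sub_status_spec : Claim_equal_get_amino_acid_sub_status := by
  intro cs _
  unfold Spec_get_amino_acid_sub_status get_amino_acid_sub_status get_amino_acid_sub_status_alt
  simp only [pvFold_eq cs 3 (by omega), Bool.not_eq_eq_eq_not, Bool.not_true]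
  have hb := pvG_bounds cs
  have h3 : min (3 : Int) (pvG cs) = pvG cs := by omega
  rw [h3]
  split_ifs with hnp hstop hlong
  · -- nothing protein-altering: every scan comes out false
    have hstopf : cs.contains "stop_gained" = false := by
      rcases Bool.eq_false_or_eq_true (cs.contains "stop_gained") with h | h
      · exact absurd (pvStop_imp cs h) (by intro h'; rw [h'] at hnp; simp at hnp)
      · exact h
    have hlongf : (cs.any (fun c =>
        (["frameshift_variant", "splice_acceptor_variant",
          "splice_donor_variant", "stop_lost"] : List String).contains c)) = false := by
      rcases Bool.eq_false_or_eq_true (cs.any (fun c =>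
        (["frameshift_variant", "splice_acceptor_variant",
          "splice_donor_variant", "stop_lost"] : List String).contains c)) with h | h
      · exact absurd (pvLong_imp cs h) (by intro h'; rw [h'] at hnp; simp at hnp)
      · exact h
    have hg : pvG cs = 3 := by
      unfold pvG
      rw [if_neg (by intro h'; rw [h'] at hstopf; simp at hstopf),
        if_neg (by intro h'; rw [h'] at hlongf; simp at hlongf),
        if_neg (by intro h'; rw [h'] at hnp; simp at hnp)]
    rw [hg]; decide
  · have hg : pvG cs = 0 := by unfold pvG; rw [if_pos hstop]
    rw [hg]; decide
  · have hg : pvG cs = 1 := by unfold pvG; rw [if_neg hstop, if_pos hlong]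
    rw [hg]; decide
  · have hnp' : cs.any (fun c => PROTEIN_ALTERING_CONSEQUENCES.contains c) = true := by
      simpa using hnp
    have hg : pvG cs = 2 := by unfold pvG; rw [if_neg hstop, if_neg hlong, if_pos hnp']
    rw [hg]; decide
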